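-- pv_equiv track=rewrite | github.com/azharmateen/regex-stepper | regex_stepper/explainer.py | _describe_charclass_members
-- ===== SOURCE A (Python) =====
-- from typing import List
--
-- def _describe_charclass_members(members: str) -> str:
--     """Describe character class members in English."""
--     parts: List[str] = []
--     i = 0
--     while i < len(members):
--         if i + 2 < len(members) and members[i + 1] == "-":
--             parts.append(f"'{members[i]}' to '{members[i + 2]}'")
--             i += 3
--         elif members[i] == "\\" and i + 1 < len(members):
--             esc_map = {
--                 "d": "any digit",
--                 "D": "any non-digit",
--                 "w": "any word character",
--                 "W": "any non-word character",
--                 "s": "any whitespace",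
--                 "S": "any non-whitespace",
--                 "n": "newline",
--                 "t": "tab",
--             }
--             esc = members[i + 1]
--             parts.append(esc_map.get(esc, f"'{esc}'"))
--             i += 2
--         else:
--             parts.append(f"'{members[i]}'")
--             i += 1
--     if len(parts) == 1:
--         return parts[0]
--     return ", ".join(parts[:-1]) + " or " + parts[-1]
-- ===== SOURCE B (Python) =====
-- # B: streaming tokenizer — a lookahead buffer fed from an iterator yields one English
-- # description per token; no index arithmetic, and the escape map is built once at module level.
--
-- _ESC_MAP = {
--     "d": "any digit",
--     "D": "any non-digit",
--     "w": "any word character",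
--     "W": "any non-word character",
--     "s": "any whitespace",
--     "S": "any non-whitespace",
--     "n": "newline",
--     "t": "tab",
-- }
--
--
-- def _tokens(members: str):
--     it = iter(members)
--     buf = []
--     while True:
--         while len(buf) < 3:
--             try:
--                 buf.append(next(it))
--             except StopIteration:
--                 break
--         if not buf:
--             return
--         if len(buf) == 3 and buf[1] == "-":
--             yield f"'{buf[0]}' to '{buf[2]}'"
--             buf.clear()
--         elif buf[0] == "\\" and len(buf) >= 2:
--             yield _ESC_MAP.get(buf[1], f"'{buf[1]}'")
--             del buf[:2]
--         else:
--             yield f"'{buf[0]}'"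
--             del buf[:1]
--
--
-- def _describe_charclass_members(members: str) -> str:
--     parts = list(_tokens(members))
--     if len(parts) == 1:
--         return parts[0]
--     return ", ".join(parts[:-1]) + " or " + parts[-1]
-- ===== Notes on version B (the rewrite author's own statement) =====
-- stated objective: alternative
-- what changed: Replaced the index-stepping while-loop that rebuilds the escape map on every escape with a streaming generator that tokenizes through a 3-char lookahead buffer fed from an iterator, using a module-level escape map built once; same O(n) cost.
import Mathlib
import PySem

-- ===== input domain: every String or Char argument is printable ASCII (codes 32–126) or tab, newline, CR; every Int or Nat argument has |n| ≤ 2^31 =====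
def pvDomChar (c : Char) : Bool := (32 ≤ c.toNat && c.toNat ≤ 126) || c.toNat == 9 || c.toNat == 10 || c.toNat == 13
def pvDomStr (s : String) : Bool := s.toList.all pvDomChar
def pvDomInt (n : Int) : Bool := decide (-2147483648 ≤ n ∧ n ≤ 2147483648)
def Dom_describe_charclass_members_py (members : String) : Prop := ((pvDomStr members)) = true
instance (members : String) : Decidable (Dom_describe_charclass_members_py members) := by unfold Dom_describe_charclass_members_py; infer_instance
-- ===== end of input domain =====

-- B replaces A's index-stepping loop (which rebuilds the escape dict on every escape) by a
-- streaming lookahead-buffer tokenizer with the escape map built once: a different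
-- decomposition of the same O(n) scan, same output.


-- ===== PORT A =====
-- A's while-loop over index i: 'remaining ≥ 3' is exactly 'i + 2 < len(members)' and
-- 'remaining ≥ 2' is 'i + 1 < len(members)', so the loop is the structural recursion below
-- on the suffix of characters not yet consumed; parts accumulates the rendered strings.
def pvAloop : List Char → List (List Char)
  | a :: b :: c :: rest =>
      if b = '-' then
        (['\''] ++ [a] ++ "' to '".toList ++ [c] ++ ['\'']) :: pvAloop rest
      else if a = '\\' then
        -- esc_map is built afresh here on every escape, as in A
        let esc_map : PySem.Dict Char (List Char) :=
          ((((((((PySem.Dict.empty.insert 'd' "any digit".toList).insert 'D' "any non-digit".toList).insert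
            'w' "any word character".toList).insert 'W' "any non-word character".toList).insert
            's' "any whitespace".toList).insert 'S' "any non-whitespace".toList).insert
            'n' "newline".toList).insert 't' "tab".toList)
        esc_map.getD b (['\''] ++ [b] ++ ['\'']) :: pvAloop (c :: rest)
      else
        (['\''] ++ [a] ++ ['\'']) :: pvAloop (b :: c :: rest)
  | [a, b] =>
      if a = '\\' then
        let esc_map : PySem.Dict Char (List Char) :=
          ((((((((PySem.Dict.empty.insert 'd' "any digit".toList).insert 'D' "any non-digit".toList).insert
            'w' "any word character".toList).insert 'W' "any non-word character".toList).insert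
            's' "any whitespace".toList).insert 'S' "any non-whitespace".toList).insert
            'n' "newline".toList).insert 't' "tab".toList)
        esc_map.getD b (['\''] ++ [b] ++ ['\'']) :: pvAloop []
      else
        (['\''] ++ [a] ++ ['\'']) :: pvAloop [b]
  | [a] => (['\''] ++ [a] ++ ['\'']) :: pvAloop []
  | [] => []

def describe_charclass_members_py (members : String) : String :=
  let parts := pvAloop members.toList
  if parts.length = 1 then String.ofList (parts.getD 0 [])
  else String.ofList (PySem.Chars.join ", ".toList (PySem.List.slice parts none (some (-1))) ++
                  " or ".toList ++ PySem.List.pyGetD parts (-1) [])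

-- ===== PORT B =====
-- module-level escape map (built once)
def pvEscMap : PySem.Dict Char (List Char) :=
  ((((((((PySem.Dict.empty.insert 'd' "any digit".toList).insert 'D' "any non-digit".toList).insert
    'w' "any word character".toList).insert 'W' "any non-word character".toList).insert
    's' "any whitespace".toList).insert 'S' "any non-whitespace".toList).insert
    'n' "newline".toList).insert 't' "tab".toList)

-- _tokens: buf is the lookahead buffer (≤ 3 chars), rest the unread iterator; the inner
-- while refills buf to 3 when possible, then one token is recognised and yielded.
mutual
def pvTokens : List Char → List Char → List (List Char)
  | buf, c :: rs =>
      if buf.length < 3 then pvTokens (buf ++ [c]) rs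
      else pvStep buf (c :: rs)
  | buf, [] => pvStep buf []
  termination_by buf rest => (rest.length, buf.length, 1)

def pvStep : List Char → List Char → List (List Char)
  | [], _ => []
  | [a], rest => (['\''] ++ [a] ++ ['\'']) :: pvTokens [] rest
  | [a, b], rest =>
      if a = '\\' then pvEscMap.getD b (['\''] ++ [b] ++ ['\'']) :: pvTokens [] rest
      else (['\''] ++ [a] ++ ['\'']) :: pvTokens [b] rest
  | a :: b :: c :: buf', rest =>
      if b = '-' then (['\''] ++ [a] ++ "' to '".toList ++ [c] ++ ['\'']) :: pvTokens buf' rest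
      else if a = '\\' then pvEscMap.getD b (['\''] ++ [b] ++ ['\'']) :: pvTokens (c :: buf') rest
      else (['\''] ++ [a] ++ ['\'']) :: pvTokens (b :: c :: buf') rest
  termination_by buf rest => (rest.length, buf.length, 0)
end

def describe_charclass_members_py_alt (members : String) : String :=
  let parts := pvTokens [] members.toList
  if parts.length = 1 then String.ofList (parts.getD 0 [])
  else String.ofList (PySem.Chars.join ", ".toList (PySem.List.slice parts none (some (-1))) ++
                  " or ".toList ++ PySem.List.pyGetD parts (-1) [])

-- ===== PRECONDITION & SPEC =====
-- Pre_ excludes only the empty string, on which A raises IndexError (parts[-1] of []).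
def Pre_describe_charclass_members_py (members : String) : Prop := members ≠ ""
instance (members : String) : Decidable (Pre_describe_charclass_members_py members) := by
  unfold Pre_describe_charclass_members_py; infer_instance

def pvWitness_describe_charclass_members_py : String := "a-z\\d_"

def Spec_describe_charclass_members_py (members : String) (out : String) : Prop := out = describe_charclass_members_py_alt members
instance (members : String) (out : String) : Decidable (Spec_describe_charclass_members_py members out) := by unfold Spec_describe_charclass_members_py; infer_instance

-- ===== CLAIM (what is proved, stated in full; the proofs are below) =====
def Claim_equal_describe_charclass_members_py : Prop := ∀ (members : String), Dom_describe_charclass_members_py members → Pre_describe_charclass_members_py members → Spec_describe_charclass_members_py members (describe_charclass_members_py members)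

-- ===== LEMMAS AND PROOFS =====

-- B's buffered tokenizer produces exactly A's parts list: with at most 3 buffered
-- characters, tokens on (buf, rest) equals A's loop on buf ++ rest (pvStep is only
-- reached with a full buffer or an exhausted iterator, hence the side condition).
theorem pvTokens_eq_aloop_joint :
    (∀ (buf rest : List Char), buf.length ≤ 3 → pvTokens buf rest = pvAloop (buf ++ rest)) ∧
    (∀ (buf rest : List Char), buf.length ≤ 3 → (buf.length = 3 ∨ rest = []) →
      pvStep buf rest = pvAloop (buf ++ rest)) := by
  refine pvTokens.mutual_induct
    (fun buf rest => buf.length ≤ 3 → pvTokens buf rest = pvAloop (buf ++ rest))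
    (fun buf rest => buf.length ≤ 3 → (buf.length = 3 ∨ rest = []) →
      pvStep buf rest = pvAloop (buf ++ rest)) ?_ ?_ ?_ ?_ ?_ ?_ ?_ ?_ ?_ ?_
  · intro buf c rs hlt ih h
    rw [pvTokens, if_pos hlt, ih (by simp; omega), List.append_assoc]
    rfl
  · intro buf c rs hge ih h
    rw [pvTokens, if_neg hge]
    exact ih h (Or.inl (by omega))
  · intro buf ih h
    rw [pvTokens]
    exact ih h (Or.inr rfl)
  · intro x h hor
    have hnil : x = [] := hor.resolve_left (by simp)
    subst hnil
    simp [pvStep, pvAloop]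
  · intro a rest ih h hor
    have hr : rest = [] := hor.resolve_left (by simp)
    subst hr
    rw [pvStep, ih (by simp)]
    rfl
  · intro b rest ih h hor
    have hr : rest = [] := hor.resolve_left (by simp)
    subst hr
    rw [pvStep, if_pos rfl, ih (by simp)]
    simp [pvAloop, pvEscMap]
  · intro a b rest hne ih h hor
    have hr : rest = [] := hor.resolve_left (by simp)
    subst hr
    rw [pvStep, if_neg hne, ih (by simp)]
    simp [pvAloop, hne]
  · intro a c buf' rest ih h hor
    have hb : buf' = [] := List.eq_nil_of_length_eq_zero (by simp at h; omega)
    subst hb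
    rw [pvStep, if_pos rfl, ih (by simp)]
    rfl
  · intro b c buf' rest hne ih h hor
    have hb : buf' = [] := List.eq_nil_of_length_eq_zero (by simp at h; omega)
    subst hb
    rw [pvStep, if_neg hne, if_pos rfl, ih (by simp)]
    simp [pvAloop, hne, pvEscMap]
  · intro a b c buf' rest hnb hna ih h hor
    have hb : buf' = [] := List.eq_nil_of_length_eq_zero (by simp at h; omega)
    subst hb
    rw [pvStep, if_neg hnb, if_neg hna, ih (by simp)]
    simp [pvAloop, hnb, hna]

theorem pvTokens_eq_aloop : ∀ (buf rest : List Char), buf.length ≤ 3 →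
    pvTokens buf rest = pvAloop (buf ++ rest) := pvTokens_eq_aloop_joint.1

-- ===== VERDICT (by name: the statement is the Claim_ definition above) =====
theorem describe_charclass_members_py_spec : Claim_equal_describe_charclass_members_py := by
  intro members _ _
  unfold Spec_describe_charclass_members_py describe_charclass_members_py describe_charclass_members_py_alt
  rw [pvTokens_eq_aloop [] members.toList (by simp)]
  rfl
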